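-- pv_equiv track=rewrite | github.com/storkme/fucktorio | src/validate.py | _bfs_belt_reach
-- ===== SOURCE A (Python) =====
-- from collections import defaultdict, deque
--
-- def _bfs_belt_reach(
--     starts: set[tuple[int, int]],
--     belt_tiles: set[tuple[int, int]],
--     ug_pairs: dict[tuple[int, int], tuple[int, int]] | None = None,
-- ) -> set[tuple[int, int]]:
--     """BFS flood-fill through adjacent belt tiles from start positions.
--
--     Traverses underground belt tunnels via ug_pairs mapping.
--     """
--     visited: set[tuple[int, int]] = set()
--     queue = deque(starts)
--     visited.update(starts)
--
--     while queue:
--         x, y = queue.popleft()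
--         neighbors: list[tuple[int, int]] = [(x + dx, y + dy) for dx, dy in [(1, 0), (-1, 0), (0, 1), (0, -1)]]
--         if ug_pairs and (x, y) in ug_pairs:
--             neighbors.append(ug_pairs[(x, y)])
--         for nb in neighbors:
--             if nb in belt_tiles and nb not in visited:
--                 visited.add(nb)
--                 queue.append(nb)
--
--     return visited
-- ===== SOURCE B (Python) =====
-- def _bfs_belt_reach(
--     starts: set[tuple[int, int]],
--     belt_tiles: set[tuple[int, int]],
--     ug_pairs: dict[tuple[int, int], tuple[int, int]] | None = None,
-- ) -> set[tuple[int, int]]: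
--     """Flood-fill in two staged passes.
--
--     Pass 1 builds, once, a belt-pruned adjacency map for every tile that could
--     ever be expanded (belt tiles and starts), so the traversal has no belt
--     membership test and no neighbor generation left in it.
--     Pass 2 sweeps a cursor over the growing visited-order list: the output
--     list is its own work queue (no deque, no frontier).
--     """
--     tunnel = ug_pairs if ug_pairs else {}
--     adj = {}
--     for t in belt_tiles | starts:
--         x, y = t
--         cands = [(x + 1, y), (x - 1, y), (x, y + 1), (x, y - 1)]
--         if t in tunnel:
--             cands.append(tunnel[t])
--         adj[t] = [nb for nb in cands if nb in belt_tiles]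
--     seen = set(starts)
--     order = list(seen)
--     i = 0
--     while i < len(order):
--         for nb in adj[order[i]]:
--             if nb not in seen:
--                 seen.add(nb)
--                 order.append(nb)
--         i += 1
--     return seen
-- ===== Notes on version B (the rewrite author's own statement) =====
-- stated objective: alternative
-- what changed: A's single interleaved pass (deque BFS generating neighbors and testing belt membership per dequeued tile) is replaced by two staged passes: first build a belt-pruned adjacency map over all tiles once, then traverse with a cursor index into the growing visited-order list itself (the output list is its own queue; the inner test is only visited-membership).
import Mathlib
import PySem

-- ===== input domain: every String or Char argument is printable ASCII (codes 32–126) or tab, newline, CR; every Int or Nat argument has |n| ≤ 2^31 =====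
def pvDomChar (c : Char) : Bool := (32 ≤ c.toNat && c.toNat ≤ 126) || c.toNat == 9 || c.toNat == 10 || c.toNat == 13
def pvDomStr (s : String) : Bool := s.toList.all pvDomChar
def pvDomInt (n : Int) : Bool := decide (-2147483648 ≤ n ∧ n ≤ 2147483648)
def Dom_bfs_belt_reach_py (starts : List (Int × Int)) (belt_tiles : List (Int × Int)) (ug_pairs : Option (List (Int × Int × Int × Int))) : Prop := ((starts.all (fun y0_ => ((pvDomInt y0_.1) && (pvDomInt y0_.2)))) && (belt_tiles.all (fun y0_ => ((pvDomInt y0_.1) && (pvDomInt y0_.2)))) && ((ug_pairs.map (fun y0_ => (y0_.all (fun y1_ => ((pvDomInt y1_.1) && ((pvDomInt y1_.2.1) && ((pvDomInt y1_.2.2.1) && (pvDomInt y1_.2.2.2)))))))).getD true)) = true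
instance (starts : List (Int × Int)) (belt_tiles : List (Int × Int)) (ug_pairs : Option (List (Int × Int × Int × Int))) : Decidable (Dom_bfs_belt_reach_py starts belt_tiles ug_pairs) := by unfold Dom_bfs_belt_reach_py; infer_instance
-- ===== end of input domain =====

-- One honest line: B replaces A's single interleaved deque-BFS pass by two staged passes —
-- build a belt-pruned adjacency map once, then sweep a cursor over the growing visited-order
-- list (the output list is its own queue) — objective: alternative, same return value.
-- Both return the visited SET (Python set, order not observable); the ports build it in insertion order.
-- Both loops carry a Nat fuel parameter purely as a totality guard (proved never to run out below).

-- ===== PORT A =====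

-- first-match lookup of the ug_pairs dict (key (x,y) -> value pair), with Python's truthiness guard
def pvUgA (ug : Option (List (Int × Int × Int × Int))) (x y : Int) : List (Int × Int) :=
  match ug with
  | none => []
  | some l =>
    if l = [] then []
    else
      match l.find? (fun q => q.1 == x && q.2.1 == y) with
      | some q => [(q.2.2.1, q.2.2.2)]
      | none => []

-- neighbors = [(x+dx,y+dy) ...]; then conditionally append ug_pairs[(x,y)]
def pvNbrsA (ug : Option (List (Int × Int × Int × Int))) (x y : Int) : List (Int × Int) :=
  [(x + 1, y), (x - 1, y), (x, y + 1), (x, y - 1)] ++ pvUgA ug x y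

-- body of "for nb in neighbors: if nb in belt_tiles and nb not in visited: ..."
-- state: (visited, queue accumulator); accepted tiles are appended at the right end
def pvVisitA (belt : List (Int × Int)) (s : PySem.Set (Int × Int) × List (Int × Int))
    (nb : Int × Int) : PySem.Set (Int × Int) × List (Int × Int) :=
  if belt.contains nb && !(PySem.Set.contains s.1 nb) then (PySem.Set.add s.1 nb, s.2 ++ [nb]) else s

-- A's main loop: while queue: pop left; expand; append new tiles to the queue's right end
def pvLoopA (belt : List (Int × Int)) (ug : Option (List (Int × Int × Int × Int))) :
    Nat → PySem.Set (Int × Int) → List (Int × Int) → List (Int × Int)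
  | _, v, [] => v
  | 0, v, _ :: _ => v
  | fuel + 1, v, t :: q =>
    let s := (pvNbrsA ug t.1 t.2).foldl (pvVisitA belt) (v, q)
    pvLoopA belt ug fuel s.1 s.2

def bfs_belt_reach_py (starts : List (Int × Int)) (belt_tiles : List (Int × Int)) (ug_pairs : Option (List (Int × Int × Int × Int))) : List (Int × Int) :=
  -- visited = set(); queue = deque(starts); visited.update(starts)
  let visited := PySem.Set.update PySem.Set.empty starts
  pvLoopA belt_tiles ug_pairs (starts.length + 2 * belt_tiles.length) visited starts

-- ===== PORT B =====

-- tunnel = ug_pairs if ug_pairs else {}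
def pvTunnelB (ug : Option (List (Int × Int × Int × Int))) : List (Int × Int × Int × Int) :=
  match ug with
  | none => []
  | some l => if l = [] then [] else l

-- cands = the four deltas, plus tunnel[t] when present
def pvCandsB (tun : List (Int × Int × Int × Int)) (x y : Int) : List (Int × Int) :=
  [(x + 1, y), (x - 1, y), (x, y + 1), (x, y - 1)] ++
    (match tun.find? (fun q => q.1 == x && q.2.1 == y) with
     | some q => [(q.2.2.1, q.2.2.2)]
     | none => [])

-- adj[t] = [nb for nb in cands if nb in belt_tiles]
def pvAdjEntry (belt : List (Int × Int)) (tun : List (Int × Int × Int × Int))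
    (t : Int × Int) : List (Int × Int) :=
  (pvCandsB tun t.1 t.2).filter (fun nb => belt.contains nb)

-- 'if nb not in seen: seen.add(nb); order.append(nb)'  (no belt test left: adj is pre-pruned)
def pvStepC (s : PySem.Set (Int × Int) × List (Int × Int)) (nb : Int × Int) :
    PySem.Set (Int × Int) × List (Int × Int) :=
  if !(PySem.Set.contains s.1 nb) then (PySem.Set.add s.1 nb, s.2 ++ [nb]) else s

-- B's cursor sweep: while i < len(order): expand adj[order[i]]; i += 1
-- (adj[order[i]] is ported as getD with default []; the key is always present — proved below)
def pvLoopC (adj : PySem.Dict (Int × Int) (List (Int × Int))) :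
    Nat → PySem.Set (Int × Int) × List (Int × Int) → Nat → PySem.Set (Int × Int)
  | 0, s, _ => s.1
  | fuel + 1, s, i =>
    if i < s.2.length then
      pvLoopC adj fuel ((adj.getD (s.2.getD i (0, 0)) []).foldl pvStepC s) (i + 1)
    else s.1

def bfs_belt_reach_py_alt (starts : List (Int × Int)) (belt_tiles : List (Int × Int)) (ug_pairs : Option (List (Int × Int × Int × Int))) : List (Int × Int) :=
  -- tunnel = ug_pairs if ug_pairs else {}
  let tun := pvTunnelB ug_pairs
  -- for t in belt_tiles | starts: adj[t] = pruned candidate list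
  let nodes := PySem.Set.union (PySem.Set.ofList belt_tiles) starts
  let adj := nodes.foldl (fun d t => d.insert t (pvAdjEntry belt_tiles tun t)) PySem.Dict.empty
  -- seen = set(starts); order = list(seen); i = 0
  let seen := PySem.Set.ofList starts
  pvLoopC adj (starts.length + 2 * belt_tiles.length) (seen, seen) 0

-- ===== PRECONDITION & SPEC =====
def Spec_bfs_belt_reach_py (starts : List (Int × Int)) (belt_tiles : List (Int × Int)) (ug_pairs : Option (List (Int × Int × Int × Int))) (out : List (Int × Int)) : Prop := out = bfs_belt_reach_py_alt starts belt_tiles ug_pairs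
instance (starts : List (Int × Int)) (belt_tiles : List (Int × Int)) (ug_pairs : Option (List (Int × Int × Int × Int))) (out : List (Int × Int)) : Decidable (Spec_bfs_belt_reach_py starts belt_tiles ug_pairs out) := by unfold Spec_bfs_belt_reach_py; infer_instance

-- ===== CLAIM (what is proved, stated in full; the proofs are below) =====
def Claim_equal_bfs_belt_reach_py : Prop := ∀ (starts : List (Int × Int)) (belt_tiles : List (Int × Int)) (ug_pairs : Option (List (Int × Int × Int × Int))), Dom_bfs_belt_reach_py starts belt_tiles ug_pairs → Spec_bfs_belt_reach_py starts belt_tiles ug_pairs (bfs_belt_reach_py starts belt_tiles ug_pairs)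

-- ===== LEMMAS AND PROOFS =====

theorem pvVisitA_pos (belt : List (Int × Int)) (v : PySem.Set (Int × Int)) (q : List (Int × Int))
    (nb : Int × Int) (hc : (belt.contains nb && !(PySem.Set.contains v nb)) = true) :
    pvVisitA belt (v, q) nb = (PySem.Set.add v nb, q ++ [nb]) := by
  show (if belt.contains nb && !(PySem.Set.contains v nb) then (PySem.Set.add v nb, q ++ [nb]) else (v, q)) = _
  rw [if_pos hc]

theorem pvVisitA_neg (belt : List (Int × Int)) (v : PySem.Set (Int × Int)) (q : List (Int × Int))
    (nb : Int × Int) (hc : ¬ (belt.contains nb && !(PySem.Set.contains v nb)) = true) :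
    pvVisitA belt (v, q) nb = (v, q) := by
  show (if belt.contains nb && !(PySem.Set.contains v nb) then (PySem.Set.add v nb, q ++ [nb]) else (v, q)) = _
  rw [if_neg hc]

-- measure: twice the number of distinct belt tiles not yet visited (drives the fuel bounds)
def pvCnt (belt : List (Int × Int)) (v : List (Int × Int)) : Nat :=
  ((PySem.List.dedup belt).filter (fun b => !(v.contains b))).length

theorem pv_filter_length_lt {α : Type} (l : List α) (p p' : α → Bool)
    (h : ∀ a, p' a = true → p a = true) (x : α) (hx : x ∈ l)
    (hpx : p x = true) (hp'x : p' x = false) :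
    (l.filter p').length < (l.filter p).length := by
  obtain ⟨l1, l2, rfl⟩ := List.append_of_mem hx
  have m1 : (l1.filter p').length ≤ (l1.filter p).length := by
    simp only [← List.countP_eq_length_filter]
    exact List.countP_mono_left (fun a _ hpa => h a hpa)
  have m2 : (l2.filter p').length ≤ (l2.filter p).length := by
    simp only [← List.countP_eq_length_filter]
    exact List.countP_mono_left (fun a _ hpa => h a hpa)
  simp [List.filter_append, hpx, hp'x]
  omega

theorem pvCnt_add_lt (belt : List (Int × Int)) (v : PySem.Set (Int × Int)) (nb : Int × Int)
    (hb : belt.contains nb = true) (hv : PySem.Set.contains v nb = false) :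
    pvCnt belt (PySem.Set.add v nb) < pvCnt belt v := by
  have hbm : nb ∈ belt := by simpa using hb
  have hnv : nb ∉ v := by simpa using hv
  rw [PySem.Set.add_of_not_mem hnv]
  refine pv_filter_length_lt (PySem.List.dedup belt)
    (fun b => !(v.contains b)) (fun b => !((v ++ [nb]).contains b)) ?_ nb ?_ ?_ ?_
  · intro a ha
    simp at ha ⊢
    tauto
  · simpa [PySem.List.mem_dedup] using hbm
  · simpa using hnv
  · simp

-- one node's neighbor fold can only shrink the measure (each accepted tile: acc +1, 2*cnt -2)
theorem pvVisit_measure (belt : List (Int × Int)) (ns : List (Int × Int)) :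
    ∀ (v : PySem.Set (Int × Int)) (q : List (Int × Int)),
      2 * pvCnt belt (ns.foldl (pvVisitA belt) (v, q)).1 +
        (ns.foldl (pvVisitA belt) (v, q)).2.length ≤ 2 * pvCnt belt v + q.length := by
  induction ns with
  | nil => intro v q; simp
  | cons nb ns ih =>
    intro v q
    simp only [List.foldl_cons]
    by_cases hc : (belt.contains nb && !(PySem.Set.contains v nb)) = true
    · rw [pvVisitA_pos belt v q nb hc]
      have hc' := hc
      simp only [Bool.and_eq_true, Bool.not_eq_true'] at hc'
      have h2 := pvCnt_add_lt belt v nb hc'.1 hc'.2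
      have h1 := ih (PySem.Set.add v nb) (q ++ [nb])
      simp only [List.length_append, List.length_cons, List.length_nil] at h1 ⊢
      omega
    · rw [pvVisitA_neg belt v q nb hc]
      exact ih v q

-- the per-node fold's visited result does not depend on the accumulator,
-- and accepted tiles are appended to its right end
theorem pvVisit_acc (belt : List (Int × Int)) (ns : List (Int × Int)) :
    ∀ (v : PySem.Set (Int × Int)) (q : List (Int × Int)),
      ns.foldl (pvVisitA belt) (v, q) =
        ((ns.foldl (pvVisitA belt) (v, [])).1, q ++ (ns.foldl (pvVisitA belt) (v, [])).2) := by
  induction ns with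
  | nil => intro v q; simp
  | cons nb ns ih =>
    intro v q
    simp only [List.foldl_cons]
    by_cases hc : (belt.contains nb && !(PySem.Set.contains v nb)) = true
    · rw [pvVisitA_pos belt v q nb hc, pvVisitA_pos belt v [] nb hc]
      simp only [List.nil_append]
      rw [ih (PySem.Set.add v nb) (q ++ [nb]), ih (PySem.Set.add v nb) [nb]]
      simp
    · rw [pvVisitA_neg belt v q nb hc, pvVisitA_neg belt v [] nb hc]
      exact ih v q

-- B's candidate list (over the extracted tunnel dict) is A's neighbor list
theorem pvCands_eq (ug : Option (List (Int × Int × Int × Int))) (x y : Int) :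
    pvCandsB (pvTunnelB ug) x y = pvNbrsA ug x y := by
  cases ug with
  | none => simp [pvCandsB, pvTunnelB, pvNbrsA, pvUgA]
  | some l =>
    by_cases h : l = []
    · subst h; simp [pvCandsB, pvTunnelB, pvNbrsA, pvUgA]
    · simp [pvCandsB, pvTunnelB, pvNbrsA, pvUgA, h]

-- visited only grows along the fold
theorem pv_fold_mono (belt : List (Int × Int)) (ns : List (Int × Int)) :
    ∀ (v : PySem.Set (Int × Int)) (q : List (Int × Int)) (x : Int × Int), x ∈ v →
      x ∈ (ns.foldl (pvVisitA belt) (v, q)).1 := by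
  induction ns with
  | nil => intro v q x hx; simpa using hx
  | cons nb ns ih =>
    intro v q x hx
    simp only [List.foldl_cons]
    by_cases hc : (belt.contains nb && !(PySem.Set.contains v nb)) = true
    · rw [pvVisitA_pos belt v q nb hc]
      exact ih _ _ x (by simp [PySem.Set.mem_add, hx])
    · rw [pvVisitA_neg belt v q nb hc]
      exact ih _ _ x hx

-- after the fold, every belt member of ns is visited
theorem pv_fold_post (belt : List (Int × Int)) (ns : List (Int × Int)) :
    ∀ (v : PySem.Set (Int × Int)) (q : List (Int × Int)) (nb : Int × Int), nb ∈ ns →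
      belt.contains nb = true → nb ∈ (ns.foldl (pvVisitA belt) (v, q)).1 := by
  induction ns with
  | nil => intro v q nb h; simp at h
  | cons a ns ih =>
    intro v q nb hmem hb
    simp only [List.foldl_cons]
    rcases List.mem_cons.mp hmem with h | h
    · subst h
      by_cases hc : (belt.contains nb && !(PySem.Set.contains v nb)) = true
      · rw [pvVisitA_pos belt v q nb hc]
        exact pv_fold_mono belt ns _ _ nb (by simp [PySem.Set.mem_add])
      · rw [pvVisitA_neg belt v q nb hc]
        have hv : nb ∈ v := by
          by_contra hnv
          have hcv : PySem.Set.contains v nb = false := by simpa using hnv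
          exact hc (by rw [hb, hcv]; rfl)
        exact pv_fold_mono belt ns _ _ nb hv
    · by_cases hc : (belt.contains a && !(PySem.Set.contains v a)) = true
      · rw [pvVisitA_pos belt v q a hc]; exact ih _ _ nb h hb
      · rw [pvVisitA_neg belt v q a hc]; exact ih _ _ nb h hb

-- expanding a node all of whose belt neighbors are already visited changes nothing
theorem pv_fold_noop (belt : List (Int × Int)) (ns : List (Int × Int)) :
    ∀ (v : PySem.Set (Int × Int)) (q : List (Int × Int)),
      (∀ nb ∈ ns, belt.contains nb = true → nb ∈ v) →
      ns.foldl (pvVisitA belt) (v, q) = (v, q) := by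
  induction ns with
  | nil => intro v q _; simp
  | cons nb ns ih =>
    intro v q h
    simp only [List.foldl_cons]
    have hstep : pvVisitA belt (v, q) nb = (v, q) := by
      apply pvVisitA_neg
      simp only [Bool.and_eq_true, Bool.not_eq_true', not_and]
      intro hb
      have := h nb (by simp) hb
      simp [this]
    rw [hstep]
    exact ih v q (fun x hx => h x (by simp [hx]))

-- every tile the fold appends is a belt tile
theorem pv_fold_acc_belt (belt : List (Int × Int)) (ns : List (Int × Int)) :
    ∀ (v : PySem.Set (Int × Int)) (q : List (Int × Int)),
      (∀ x ∈ q, belt.contains x = true) →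
      ∀ x ∈ (ns.foldl (pvVisitA belt) (v, q)).2, belt.contains x = true := by
  induction ns with
  | nil => intro v q h x hx; exact h x hx
  | cons nb ns ih =>
    intro v q h x hx
    simp only [List.foldl_cons] at hx
    by_cases hc : (belt.contains nb && !(PySem.Set.contains v nb)) = true
    · rw [pvVisitA_pos belt v q nb hc] at hx
      refine ih _ _ ?_ x hx
      intro y hy
      rcases List.mem_append.mp hy with hy | hy
      · exact h y hy
      · simp only [List.mem_singleton] at hy
        subst hy
        exact (Bool.and_eq_true _ _ |>.mp hc).1
    · rw [pvVisitA_neg belt v q nb hc] at hx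
      exact ih _ _ h x hx

-- with enough fuel, one queue step costs one fuel and strictly shrinks the measure
theorem pvLoopA_dec (belt : List (Int × Int)) (ug : Option (List (Int × Int × Int × Int)))
    (v : PySem.Set (Int × Int)) (t : Int × Int) (q : List (Int × Int)) :
    2 * pvCnt belt ((pvNbrsA ug t.1 t.2).foldl (pvVisitA belt) (v, q)).1 +
      ((pvNbrsA ug t.1 t.2).foldl (pvVisitA belt) (v, q)).2.length <
      2 * pvCnt belt v + (t :: q).length := by
  have := pvVisit_measure belt (pvNbrsA ug t.1 t.2) v q
  simp only [List.length_cons]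
  omega

-- fuel-free reference version of A's loop (proof-only; the ports carry fuel instead)
def pvLoopWA (belt : List (Int × Int)) (ug : Option (List (Int × Int × Int × Int)))
    (v : PySem.Set (Int × Int)) (queue : List (Int × Int)) : List (Int × Int) :=
  match queue with
  | [] => v
  | t :: q =>
    let s := (pvNbrsA ug t.1 t.2).foldl (pvVisitA belt) (v, q)
    pvLoopWA belt ug s.1 s.2
termination_by 2 * pvCnt belt v + queue.length
decreasing_by
  exact pvLoopA_dec belt ug v t q

-- the fuel in port A is sufficient: with fuel ≥ the measure it equals the fuel-free loop
theorem pvLoopA_fuel (belt : List (Int × Int)) (ug : Option (List (Int × Int × Int × Int))) :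
    ∀ (fuel : Nat) (v : PySem.Set (Int × Int)) (q : List (Int × Int)),
      2 * pvCnt belt v + q.length ≤ fuel →
      pvLoopA belt ug fuel v q = pvLoopWA belt ug v q := by
  intro fuel
  induction fuel with
  | zero =>
    intro v q h
    have hq : q = [] := by
      cases q with
      | nil => rfl
      | cons a q => simp at h
    subst hq
    rw [pvLoopA, pvLoopWA]
  | succ f ih =>
    intro v q h
    cases q with
    | nil => rw [pvLoopA, pvLoopWA]
    | cons t q =>
      rw [pvLoopA, pvLoopWA]
      have hd := pvLoopA_dec belt ug v t q
      simp only [List.length_cons] at h hd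
      exact ih _ _ (by omega)

-- a non-nodup list has some element occurring after an earlier occurrence
theorem pv_exists_dup {α : Type} (q : List α) (h : ¬ q.Nodup) :
    ∃ (q1 : List α) (t : α) (q2 : List α), q = q1 ++ t :: q2 ∧ t ∈ q1 := by
  induction q with
  | nil => exact absurd List.nodup_nil h
  | cons a q ih =>
    by_cases ha : a ∈ q
    · obtain ⟨r1, r2, rfl⟩ := List.append_of_mem ha
      exact ⟨a :: r1, a, r2, by simp, by simp⟩
    · have hq : ¬ q.Nodup := by
        intro hnd
        exact h (List.nodup_cons.mpr ⟨ha, hnd⟩)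
      obtain ⟨q1, t, q2, rfl, ht⟩ := ih hq
      exact ⟨a :: q1, t, q2, by simp, by simp [ht]⟩

-- a queue entry that occurs earlier in the queue (or is already fully expanded) may be deleted
theorem pv_skip (belt : List (Int × Int)) (ug : Option (List (Int × Int × Int × Int))) :
    ∀ (n : Nat) (v : PySem.Set (Int × Int)) (q1 : List (Int × Int)) (t : Int × Int)
      (q2 : List (Int × Int)),
      2 * pvCnt belt v + (q1 ++ t :: q2).length ≤ n →
      (t ∈ q1 ∨ ∀ nb ∈ pvNbrsA ug t.1 t.2, belt.contains nb = true → nb ∈ v) →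
      pvLoopWA belt ug v (q1 ++ t :: q2) = pvLoopWA belt ug v (q1 ++ q2) := by
  intro n
  induction n with
  | zero => intro v q1 t q2 h _; simp at h
  | succ n ih =>
    intro v q1 t q2 hm H
    cases q1 with
    | nil =>
      have hexp : ∀ nb ∈ pvNbrsA ug t.1 t.2, belt.contains nb = true → nb ∈ v := by
        rcases H with H | H
        · simp at H
        · exact H
      simp only [List.nil_append]
      rw [pvLoopWA]
      simp only [pv_fold_noop belt (pvNbrsA ug t.1 t.2) v q2 hexp]
    | cons h q1 =>
      simp only [List.cons_append]
      rw [pvLoopWA, pvLoopWA]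
      rw [pvVisit_acc belt (pvNbrsA ug h.1 h.2) v (q1 ++ t :: q2),
          pvVisit_acc belt (pvNbrsA ug h.1 h.2) v (q1 ++ q2)]
      set V := ((pvNbrsA ug h.1 h.2).foldl (pvVisitA belt) (v, [])).1 with hV
      set δ := ((pvNbrsA ug h.1 h.2).foldl (pvVisitA belt) (v, [])).2 with hδ
      have e1 : q1 ++ t :: q2 ++ δ = q1 ++ t :: (q2 ++ δ) := by simp
      have e2 : q1 ++ q2 ++ δ = q1 ++ (q2 ++ δ) := by simp
      rw [e1, e2]
      have hmeas := pvVisit_measure belt (pvNbrsA ug h.1 h.2) v (q1 ++ t :: q2)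
      rw [pvVisit_acc belt (pvNbrsA ug h.1 h.2) v (q1 ++ t :: q2)] at hmeas
      simp only [← hV, ← hδ, List.length_append, List.length_cons] at hmeas
      apply ih V q1 t (q2 ++ δ)
      · simp only [List.length_append, List.length_cons] at hm ⊢
        omega
      · rcases H with H | H
        · rcases List.mem_cons.mp H with H | H
          · subst H
            right
            intro nb hnb hb
            rw [hV]
            exact pv_fold_post belt (pvNbrsA ug t.1 t.2) v [] nb hnb hb
          · exact Or.inl H
        · right
          intro nb hnb hb
          rw [hV]
          exact pv_fold_mono belt (pvNbrsA ug h.1 h.2) v [] nb (H nb hnb hb)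

-- duplicates in the initial queue are no-ops: the queue may be deduplicated
theorem pv_dedup_queue (belt : List (Int × Int)) (ug : Option (List (Int × Int × Int × Int))) :
    ∀ (n : Nat) (v : PySem.Set (Int × Int)) (q : List (Int × Int)), q.length ≤ n →
      pvLoopWA belt ug v q = pvLoopWA belt ug v (PySem.Set.ofList q) := by
  intro n
  induction n with
  | zero =>
    intro v q h
    have : q = [] := List.length_eq_zero_iff.mp (Nat.le_zero.mp h)
    subst this
    rfl
  | succ n ih =>
    intro v q h
    by_cases hnd : q.Nodup
    · rw [PySem.Set.ofList_eq_self_of_nodup q hnd]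
    · obtain ⟨q1, t, q2, rfl, ht⟩ := pv_exists_dup q hnd
      rw [pv_skip belt ug (2 * pvCnt belt v + (q1 ++ t :: q2).length) v q1 t q2 le_rfl (Or.inl ht)]
      rw [ih v (q1 ++ q2) (by simp at h ⊢; omega)]
      congr 1
      rw [PySem.Set.ofList_append, PySem.Set.ofList_append, PySem.Set.update_cons,
          PySem.Set.add_of_mem (by simp [PySem.Set.mem_ofList, ht])]

-- lookup in the dict built by the adjacency pass: the value is the entry function of the key
theorem pv_adj_getD (f : (Int × Int) → List (Int × Int)) :
    ∀ (nodes : List (Int × Int)) (d : PySem.Dict (Int × Int) (List (Int × Int))) (t : Int × Int),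
      (nodes.foldl (fun d t => d.insert t (f t)) d).getD t [] =
        if t ∈ nodes then f t else d.getD t [] := by
  intro nodes
  induction nodes with
  | nil => intro d t; simp
  | cons a nodes ih =>
    intro d t
    simp only [List.foldl_cons]
    rw [ih]
    by_cases h1 : t ∈ nodes
    · simp [h1]
    · rw [PySem.Dict.getD_insert]
      by_cases h2 : t = a
      · subst h2; simp [h1]
      · simp [h1, h2]

-- B's fold over the pre-pruned list is A's fold over the raw candidates
theorem pv_fold_filter (belt : List (Int × Int)) (ns : List (Int × Int)) :
    ∀ (s : PySem.Set (Int × Int) × List (Int × Int)),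
      ns.foldl (pvVisitA belt) s = (ns.filter (fun nb => belt.contains nb)).foldl pvStepC s := by
  induction ns with
  | nil => intro s; rfl
  | cons nb ns ih =>
    intro s
    by_cases hb : belt.contains nb = true
    · have hstep : pvVisitA belt s nb = pvStepC s nb := by
        show (if belt.contains nb && !(PySem.Set.contains s.1 nb) then
            (PySem.Set.add s.1 nb, s.2 ++ [nb]) else s) = _
        rw [hb, Bool.true_and]
        rfl
      simp only [List.foldl_cons, List.filter_cons]
      rw [if_pos (by simpa using hb), List.foldl_cons, hstep]
      exact ih _
    · have hb' : belt.contains nb = false := by simpa using hb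
      have hstep : pvVisitA belt s nb = s := by
        show (if belt.contains nb && !(PySem.Set.contains s.1 nb) then
            (PySem.Set.add s.1 nb, s.2 ++ [nb]) else s) = s
        rw [hb', Bool.false_and, if_neg (by simp)]
      simp only [List.foldl_cons, List.filter_cons]
      rw [if_neg (by simpa using hb'), hstep]
      exact ih _

-- starting from a (seen, order) pair with equal components, the fold keeps them equal
theorem pv_fold_pair (belt : List (Int × Int)) (ns : List (Int × Int)) :
    ∀ (v : PySem.Set (Int × Int)),
      (ns.foldl (pvVisitA belt) (v, (v : List (Int × Int)))).2 =
        (ns.foldl (pvVisitA belt) (v, v)).1 := by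
  induction ns with
  | nil => intro v; rfl
  | cons nb ns ih =>
    intro v
    simp only [List.foldl_cons]
    by_cases hc : (belt.contains nb && !(PySem.Set.contains v nb)) = true
    · rw [pvVisitA_pos belt v v nb hc]
      have hnv : nb ∉ v := by
        simp only [Bool.and_eq_true, Bool.not_eq_true'] at hc
        simpa using hc.2
      rw [PySem.Set.add_of_not_mem hnv]
      exact ih (v ++ [nb])
    · rw [pvVisitA_neg belt v v nb hc]
      exact ih v

theorem pvCnt_le (belt : List (Int × Int)) (v : List (Int × Int)) :
    pvCnt belt v ≤ belt.length := by
  have h1 : ((PySem.List.dedup belt).filter (fun b => !(v.contains b))).length ≤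
      (PySem.List.dedup belt).length := List.length_filter_le _ _
  have h2 : (PySem.List.dedup belt).length ≤ belt.length := by
    rw [PySem.List.dedup_eq_ofList]
    exact PySem.Set.length_ofList_le belt
  exact le_trans h1 h2

-- MAIN BRIDGE: B's cursor sweep from a self-queued state computes A's queue BFS
theorem pv_bridge (belt : List (Int × Int)) (ug : Option (List (Int × Int × Int × Int)))
    (nodes : List (Int × Int)) (hbelt : ∀ x ∈ belt, x ∈ nodes) :
    ∀ (fuel : Nat) (s : PySem.Set (Int × Int)) (i : Nat), i ≤ s.length →
      (∀ t ∈ s, t ∈ nodes) →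
      2 * pvCnt belt s + (s.length - i) ≤ fuel →
      pvLoopC (nodes.foldl (fun d t => d.insert t (pvAdjEntry belt (pvTunnelB ug) t))
          PySem.Dict.empty) fuel (s, s) i =
        pvLoopWA belt ug s (s.drop i) := by
  intro fuel
  induction fuel with
  | zero =>
    intro s i hi _ hm
    have hlen : s.length ≤ i := by omega
    rw [pvLoopC, List.drop_eq_nil_of_le hlen, pvLoopWA]
  | succ fuel ih =>
    intro s i hi hsub hm
    rw [pvLoopC]
    by_cases hlt : i < s.length
    · simp only [if_pos hlt]
      set t := s.getD i (0, 0) with hte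
      have htget : s.getD i (0, 0) = s[i] := List.getD_eq_getElem s (0, 0) hlt
      have htmem : t ∈ s := by rw [hte, htget]; exact List.getElem_mem hlt
      -- the dict lookup is the pruned entry of t
      rw [pv_adj_getD (pvAdjEntry belt (pvTunnelB ug)) nodes PySem.Dict.empty t,
          if_pos (hsub t htmem)]
      -- B's inner fold = A's inner fold
      rw [pvAdjEntry, ← pv_fold_filter belt (pvCandsB (pvTunnelB ug) t.1 t.2) (s, s),
          pvCands_eq ug t.1 t.2]
      -- name the new visited list and the appended tail
      have hacc := pvVisit_acc belt (pvNbrsA ug t.1 t.2) s s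
      set V := ((pvNbrsA ug t.1 t.2).foldl (pvVisitA belt) (s, [])).1 with hV
      set δ := ((pvNbrsA ug t.1 t.2).foldl (pvVisitA belt) (s, [])).2 with hδ
      have hpair : V = s ++ δ := by
        have := pv_fold_pair belt (pvNbrsA ug t.1 t.2) s
        rw [pvVisit_acc belt (pvNbrsA ug t.1 t.2) s s] at this
        simpa [← hV, ← hδ] using this.symm
      have hδbelt : ∀ x ∈ δ, belt.contains x = true := by
        intro x hx
        exact pv_fold_acc_belt belt (pvNbrsA ug t.1 t.2) s [] (by simp) x (hδ ▸ hx)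
      -- step the reference loop
      rw [List.drop_eq_getElem_cons hlt, pvLoopWA]
      rw [pvVisit_acc belt (pvNbrsA ug (s[i]).1 (s[i]).2) s (s.drop (i + 1))]
      rw [hacc, ← htget, ← hte]
      simp only [← hV, ← hδ]
      rw [hpair]
      have hmeas := pvVisit_measure belt (pvNbrsA ug t.1 t.2) s []
      simp only [← hV, ← hδ, List.length_nil] at hmeas
      have hcnt : pvCnt belt (s ++ δ) = pvCnt belt V := by rw [hpair]
      have := ih (s ++ δ) (i + 1)
        (by simp only [List.length_append]; omega)
        (by
          intro x hx
          rcases List.mem_append.mp hx with hx | hx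
          · exact hsub x hx
          · exact hbelt x (by simpa using hδbelt x hx))
        (by simp only [List.length_append]; omega)
      rw [this]
      congr 1
      rw [List.drop_append_of_le_length (by omega)]
    · simp only [if_neg hlt]
      have hlen : s.length ≤ i := by omega
      rw [List.drop_eq_nil_of_le hlen, pvLoopWA]

-- ===== VERDICT (by name: the statement is the Claim_ definition above) =====
theorem bfs_belt_reach_py_spec : Claim_equal_bfs_belt_reach_py := by
  intro starts belt ug _
  show bfs_belt_reach_py starts belt ug = bfs_belt_reach_py_alt starts belt ug
  rw [bfs_belt_reach_py, bfs_belt_reach_py_alt]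
  have hS0 : PySem.Set.update PySem.Set.empty starts = PySem.Set.ofList starts := rfl
  rw [hS0]
  set S0 := PySem.Set.ofList starts with hS0e
  have hlen : S0.length ≤ starts.length := PySem.Set.length_ofList_le starts
  have hcnt : pvCnt belt S0 ≤ belt.length := pvCnt_le belt S0
  -- A side: enough fuel, then deduplicate the initial queue
  rw [pvLoopA_fuel belt ug _ S0 starts (by omega)]
  rw [pv_dedup_queue belt ug starts.length S0 starts le_rfl, ← hS0e]
  -- B side: the cursor sweep from (S0, S0) is the reference loop on queue S0
  have hbelt : ∀ x ∈ belt, x ∈ PySem.Set.union (PySem.Set.ofList belt) starts := by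
    intro x hx
    rw [PySem.Set.mem_union]
    exact Or.inl (by simpa [PySem.Set.mem_ofList] using hx)
  have hsub : ∀ t ∈ S0, t ∈ PySem.Set.union (PySem.Set.ofList belt) starts := by
    intro t ht
    rw [hS0e, PySem.Set.mem_ofList] at ht
    rw [PySem.Set.mem_union]
    exact Or.inr ht
  rw [pv_bridge belt ug (PySem.Set.union (PySem.Set.ofList belt) starts) hbelt
      (starts.length + 2 * belt.length) S0 0 (Nat.zero_le _) hsub (by omega)]
  simp
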